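-- pv_equiv track=rewrite | github.com/Concerned-Chris/Projects | team03_a4/puzzles.py | number_hex_vars
-- ===== SOURCE A (Python) =====
-- def number_hex_vars(size, number_colors):
--     result = 0
--     for i in range(size, 2 * size):
--         if i == 2 * size - 1:
--             result = result + i
--         else:
--             result = result + 2 * i
--     return result * number_colors
-- ===== SOURCE B (Python) =====
-- def number_hex_vars(size, number_colors):
--     # closed form: sum_{i=size}^{2*size-1} 2*i, with the last term counted once,
--     # equals 3*size^2 - 3*size + 1 for size > 0; the range is empty otherwise.
--     if size <= 0:
--         return 0
--     return (3 * size * size - 3 * size + 1) * number_colors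
-- ===== Notes on version B (the rewrite author's own statement) =====
-- stated objective: faster
-- what changed: Replaced the O(size) loop over range(size, 2*size) with the closed-form arithmetic-series value (3*size^2 - 3*size + 1) * number_colors (0 for size <= 0).
import Mathlib
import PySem

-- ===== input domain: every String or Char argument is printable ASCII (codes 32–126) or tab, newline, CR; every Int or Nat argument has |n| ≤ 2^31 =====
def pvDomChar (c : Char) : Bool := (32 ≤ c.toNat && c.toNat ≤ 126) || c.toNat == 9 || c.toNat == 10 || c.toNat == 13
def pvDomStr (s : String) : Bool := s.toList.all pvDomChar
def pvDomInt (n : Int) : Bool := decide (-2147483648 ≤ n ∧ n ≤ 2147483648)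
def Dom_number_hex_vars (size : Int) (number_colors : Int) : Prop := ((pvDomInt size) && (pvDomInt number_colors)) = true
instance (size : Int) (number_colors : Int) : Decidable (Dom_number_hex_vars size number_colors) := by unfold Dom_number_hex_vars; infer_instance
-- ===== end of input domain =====

-- ===== PORT A =====
def number_hex_vars (size : Int) (number_colors : Int) : Int :=
  ((PySem.List.pyRange size (2 * size) 1).foldl
    (fun result i => if i = 2 * size - 1 then result + i else result + 2 * i) 0) * number_colors

-- ===== PORT B =====
-- closed-form arithmetic series; O(1) instead of A's O(size) loop
def number_hex_vars_alt (size : Int) (number_colors : Int) : Int :=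
  if size ≤ 0 then 0 else (3 * size * size - 3 * size + 1) * number_colors

-- ===== PRECONDITION & SPEC =====
def Spec_number_hex_vars (size : Int) (number_colors : Int) (out : Int) : Prop := out = number_hex_vars_alt size number_colors
instance (size : Int) (number_colors : Int) (out : Int) : Decidable (Spec_number_hex_vars size number_colors out) := by unfold Spec_number_hex_vars; infer_instance

-- ===== CLAIM (what is proved, stated in full; the proofs are below) =====
def Claim_equal_number_hex_vars : Prop := ∀ (size : Int) (number_colors : Int), Dom_number_hex_vars size number_colors → Spec_number_hex_vars size number_colors (number_hex_vars size number_colors)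

-- ===== LEMMAS AND PROOFS =====
-- over a range whose elements are all < c, the else-branch always fires,
-- and the fold is acc + 2 * (arithmetic sum) = acc + b*(b-1) - a*(a-1)
theorem fold_no_hit (c : Int) : ∀ (a b acc : Int), a ≤ b → b ≤ c →
    (PySem.List.pyRange a b 1).foldl
      (fun result i => if i = c then result + i else result + 2 * i) acc
    = acc + b * (b - 1) - a * (a - 1) := by
  intro a b
  generalize hk : (b - a).toNat = k
  induction k generalizing a with
  | zero =>
    intro acc hab _
    have hab' : a = b := by omega
    rw [PySem.List.pyRange_one_eq_nil (by omega)]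
    subst hab'; simp only [List.foldl_nil]; ring
  | succ n ih =>
    intro acc hab hbc
    have hlt : a < b := by omega
    rw [PySem.List.pyRange_one_cons hlt, List.foldl_cons,
        if_neg (by omega), ih (a + 1) (by omega) (acc + 2 * a) (by omega) (by omega)]
    ring


-- ===== VERDICT (by name: the statement is the Claim_ definition above) =====
theorem number_hex_vars_spec : Claim_equal_number_hex_vars := by
  intro size nc _
  unfold Spec_number_hex_vars number_hex_vars number_hex_vars_alt
  by_cases h : size ≤ 0
  · rw [PySem.List.pyRange_one_eq_nil (by omega)]
    simp [h]
  · rw [not_le] at h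
    rw [if_neg (by omega)]
    have hsplit : PySem.List.pyRange size (2 * size) 1
        = PySem.List.pyRange size (2 * size - 1) 1 ++ [2 * size - 1] := by
      have := PySem.List.pyRange_one_succ_right (a := size) (b := 2 * size - 1) (by omega)
      simpa [show 2 * size - 1 + 1 = 2 * size by ring] using this
    rw [hsplit, List.foldl_append,
        fold_no_hit (2 * size - 1) size (2 * size - 1) 0 (by omega) (by omega)]
    simp only [List.foldl_cons, List.foldl_nil, if_true]
    ring
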